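-- pv_equiv track=rewrite | github.com/MichaelTroelsen/SIDM2conv | archive/experiments/compare_sf2_and_sid_bytes.py | find_byte_pattern
-- ===== SOURCE A (Python) =====
-- def find_byte_pattern(haystack, needle, min_length=8):
--     """Find where a byte pattern from needle appears in haystack."""
--     matches = []
--     needle_len = len(needle)
--
--     for i in range(len(haystack) - min_length):
--         # Check for matching sequences of at least min_length
--         match_len = 0
--         for j in range(min(needle_len, len(haystack) - i)):
--             if haystack[i + j] == needle[j]:
--                 match_len += 1
--             else:
--                 break
--
--         if match_len >= min_length:
--             matches.append({
--                 'haystack_offset': i,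
--                 'needle_offset': 0,
--                 'length': match_len
--             })
--
--     return matches
-- ===== SOURCE B (Python) =====
-- def _z_array(s):
--     """Z-algorithm: z[k] = length of the longest common prefix of s and s[k:] (z[0] left 0)."""
--     n = len(s)
--     if n == 0:
--         return []
--     z = [0]
--     l = 0
--     r = 0
--     for k in range(1, n):
--         zk = min(r - k, z[k - l]) if k < r else 0
--         while k + zk < n and s[zk] == s[k + zk]:
--             zk += 1
--         z.append(zk)
--         if k + zk > r:
--             l = k
--             r = k + zk
--     return z
--
--
-- def find_byte_pattern(haystack, needle, min_length=8):
--     """Find where a byte pattern from needle appears in haystack (Z-algorithm on needle+haystack)."""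
--     n = len(needle)
--     z = _z_array(needle + haystack)
--     matches = []
--     stop = len(haystack) - max(min_length, 0)
--     for i in range(stop):
--         length = min(z[n + i], n)
--         if length >= min_length:
--             matches.append({'haystack_offset': i, 'needle_offset': 0, 'length': length})
--     return matches
-- ===== Notes on version B (the rewrite author's own statement) =====
-- stated objective: faster
-- what changed: Replaced A's per-position rescan of the needle with one Z-algorithm pass over needle+haystack whose Z array is read back per offset.
-- intended difference: For min_length < 0, A returns phantom zero-length 'matches' at offsets len(haystack)..len(haystack)-min_length-1, past the end of the haystack; B scans only the real offsets and omits exactly those phantom entries, which is the intended value since an offset beyond the haystack holds no match. — e.g. on find_byte_pattern([], [], -1): A returns [[("haystack_offset", 0), ("needle_offset", 0), ("length", 0)]], B returns []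
import Mathlib
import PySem

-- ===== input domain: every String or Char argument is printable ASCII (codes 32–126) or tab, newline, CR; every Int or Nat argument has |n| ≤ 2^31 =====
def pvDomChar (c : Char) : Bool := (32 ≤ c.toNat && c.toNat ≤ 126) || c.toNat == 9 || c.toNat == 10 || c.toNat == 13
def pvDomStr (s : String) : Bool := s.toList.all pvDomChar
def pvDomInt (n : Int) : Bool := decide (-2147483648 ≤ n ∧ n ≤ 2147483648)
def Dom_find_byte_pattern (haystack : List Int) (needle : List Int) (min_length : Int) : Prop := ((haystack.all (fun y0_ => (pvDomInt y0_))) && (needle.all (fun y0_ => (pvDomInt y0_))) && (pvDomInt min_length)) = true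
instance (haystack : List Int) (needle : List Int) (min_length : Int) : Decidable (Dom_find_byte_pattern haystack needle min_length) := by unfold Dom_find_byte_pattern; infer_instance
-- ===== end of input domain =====

-- B replaces A's per-position rescan of the needle by one Z-algorithm pass over needle ++ haystack
-- (alternative algorithm); for negative min_length (D_ below) B scans only the real offsets,
-- dropping A's phantom entries past the end of the haystack.

-- ===== PORT A =====
-- inner 'for j in range(...)' loop of A, with its break (fuel = remaining iterations)
def pvInnerA (haystack needle : List Int) (i : Int) : Nat → Nat → Int → Int
  | 0, _, ml => ml
  | fuel+1, j, ml =>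
      if PySem.List.pyGetD haystack (i + (j : Int)) 0 = PySem.List.pyGetD needle (j : Int) 0 then
        pvInnerA haystack needle i fuel (j+1) (ml+1)
      else ml

def find_byte_pattern (haystack : List Int) (needle : List Int) (min_length : Int) : List (List (String × Int)) :=
  let needle_len : Int := needle.length
  (PySem.List.pyRange 0 ((haystack.length : Int) - min_length) 1).foldl
    (fun acc i =>
      let match_len := pvInnerA haystack needle i (min needle_len ((haystack.length : Int) - i)).toNat 0 0
      if min_length ≤ match_len then
        acc ++ [[("haystack_offset", i), ("needle_offset", (0 : Int)), ("length", match_len)]]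
      else acc) []

-- ===== PORT B =====
-- the 'while' extension step of the Z-algorithm (fuel bounds the iterations)
def pvZExtend (s : List Int) (k : Nat) : Nat → Nat → Nat
  | 0, zk => zk
  | fuel+1, zk =>
      if k + zk < s.length ∧ s.getD zk 0 = s.getD (k + zk) 0 then
        pvZExtend s k fuel (zk+1)
      else zk

-- the 'for k in range(1, n)' loop of _z_array; k = z.length, state (z, l, r)
def pvZLoop (s : List Int) : Nat → List Nat → Nat → Nat → List Nat
  | 0, z, _, _ => z
  | fuel+1, z, l, r =>
      let k := z.length
      let zk0 := if k < r then min (r - k) (z.getD (k - l) 0) else 0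
      let zk := pvZExtend s k s.length zk0
      pvZLoop s fuel (z ++ [zk]) (if r < k + zk then k else l) (if r < k + zk then k + zk else r)

def pvZArray (s : List Int) : List Nat :=
  if s.length = 0 then [] else pvZLoop s (s.length - 1) [0] 0 0

def find_byte_pattern_alt (haystack : List Int) (needle : List Int) (min_length : Int) : List (List (String × Int)) :=
  let n : Int := needle.length
  let z := pvZArray (needle ++ haystack)
  (PySem.List.pyRange 0 ((haystack.length : Int) - max min_length 0) 1).foldl
    (fun acc i =>
      let length : Int := min ((z.getD (n + i).toNat 0 : Nat) : Int) n
      if min_length ≤ length then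
        acc ++ [[("haystack_offset", i), ("needle_offset", (0 : Int)), ("length", length)]]
      else acc) []

-- ===== PRECONDITION & SPEC =====
-- For min_length < 0, A's range(len(haystack) - min_length) walks past the end of the haystack and
-- returns phantom zero-length 'matches' at offsets len(haystack) .. len(haystack)-min_length-1; B
-- scans only the real offsets and returns the same list without those phantoms — the intended value.
def D_find_byte_pattern (haystack : List Int) (needle : List Int) (min_length : Int) : Prop :=
  min_length < 0
instance (haystack : List Int) (needle : List Int) (min_length : Int) : Decidable (D_find_byte_pattern haystack needle min_length) := by unfold D_find_byte_pattern; infer_instance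

def Spec_find_byte_pattern (haystack : List Int) (needle : List Int) (min_length : Int) (out : List (List (String × Int))) : Prop := ¬ D_find_byte_pattern haystack needle min_length → out = find_byte_pattern_alt haystack needle min_length
instance (haystack : List Int) (needle : List Int) (min_length : Int) (out : List (List (String × Int))) : Decidable (Spec_find_byte_pattern haystack needle min_length out) := by unfold Spec_find_byte_pattern; infer_instance

def pvDiffWitness_find_byte_pattern : List Int × List Int × Int := ([], [], -1)
def pvDiffWitnessOut_find_byte_pattern : (List (List (String × Int))) × (List (List (String × Int))) :=
  ([[("haystack_offset", 0), ("needle_offset", 0), ("length", 0)]], [])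

-- ===== CLAIM (what is proved, stated in full; the proofs are below) =====
def Claim_unchanged_find_byte_pattern : Prop := ∀ (haystack : List Int) (needle : List Int) (min_length : Int), Dom_find_byte_pattern haystack needle min_length → Spec_find_byte_pattern haystack needle min_length (find_byte_pattern haystack needle min_length)
def Claim_changed_find_byte_pattern : Prop := Dom_find_byte_pattern (pvDiffWitness_find_byte_pattern.1) (pvDiffWitness_find_byte_pattern.2.1) (pvDiffWitness_find_byte_pattern.2.2) ∧ D_find_byte_pattern (pvDiffWitness_find_byte_pattern.1) (pvDiffWitness_find_byte_pattern.2.1) (pvDiffWitness_find_byte_pattern.2.2) ∧ find_byte_pattern (pvDiffWitness_find_byte_pattern.1) (pvDiffWitness_find_byte_pattern.2.1) (pvDiffWitness_find_byte_pattern.2.2) = pvDiffWitnessOut_find_byte_pattern.1 ∧ find_byte_pattern_alt (pvDiffWitness_find_byte_pattern.1) (pvDiffWitness_find_byte_pattern.2.1) (pvDiffWitness_find_byte_pattern.2.2) = pvDiffWitnessOut_find_byte_pattern.2 ∧ pvDiffWitnessOut_find_byte_pattern.1 ≠ pvDiffWitnessOut_find_byte_pattern.2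
def Claim_exact_find_byte_pattern : Prop := ∀ (haystack : List Int) (needle : List Int) (min_length : Int), Dom_find_byte_pattern haystack needle min_length → D_find_byte_pattern haystack needle min_length → find_byte_pattern haystack needle min_length ≠ find_byte_pattern_alt haystack needle min_length

-- ===== LEMMAS AND PROOFS =====

-- longest common prefix length of two lists
def lcpN : List Int → List Int → Nat
  | x::xs, y::ys => if x = y then lcpN xs ys + 1 else 0
  | _, _ => 0

theorem lcpN_nil_left (ys : List Int) : lcpN [] ys = 0 := by cases ys <;> rfl
theorem lcpN_nil_right (xs : List Int) : lcpN xs [] = 0 := by cases xs <;> rfl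

theorem lcpN_le_left : ∀ (xs ys : List Int), lcpN xs ys ≤ xs.length := by
  intro xs; induction xs with
  | nil => intro ys; simp [lcpN_nil_left]
  | cons x xs ih =>
    intro ys; cases ys with
    | nil => simp [lcpN_nil_right]
    | cons y ys => simp only [lcpN]; split_ifs <;> simp [Nat.succ_le_succ (ih ys)]

theorem lcpN_le_right : ∀ (xs ys : List Int), lcpN xs ys ≤ ys.length := by
  intro xs; induction xs with
  | nil => intro ys; simp [lcpN_nil_left]
  | cons x xs ih =>
    intro ys; cases ys with
    | nil => simp [lcpN_nil_right]
    | cons y ys => simp only [lcpN]; split_ifs <;> simp [Nat.succ_le_succ (ih ys)]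

theorem getD_eq_of_lt_lcpN : ∀ (xs ys : List Int) (p : Nat), p < lcpN xs ys → xs.getD p 0 = ys.getD p 0 := by
  intro xs; induction xs with
  | nil => intro ys p h; simp [lcpN_nil_left] at h
  | cons x xs ih =>
    intro ys p h; cases ys with
    | nil => simp [lcpN_nil_right] at h
    | cons y ys =>
      simp only [lcpN] at h
      split_ifs at h with hx
      · cases p with
        | zero => simp [hx]
        | succ p => simpa using ih ys p (by omega)
      · omega

theorem ne_getD_lcpN : ∀ (xs ys : List Int), lcpN xs ys < xs.length → lcpN xs ys < ys.length →
    xs.getD (lcpN xs ys) 0 ≠ ys.getD (lcpN xs ys) 0 := by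
  intro xs; induction xs with
  | nil => intro ys h1 _; simp at h1
  | cons x xs ih =>
    intro ys h1 h2; cases ys with
    | nil => simp at h2
    | cons y ys =>
      simp only [lcpN] at *
      split_ifs at * with hx
      · simpa using ih ys (by simpa using h1) (by simpa using h2)
      · simpa using hx

theorem le_lcpN_of : ∀ (xs ys : List Int) (t : Nat), t ≤ xs.length → t ≤ ys.length →
    (∀ p, p < t → xs.getD p 0 = ys.getD p 0) → t ≤ lcpN xs ys := by
  intro xs; induction xs with
  | nil => intro ys t h1 _ _; rw [lcpN_nil_left]; simpa using h1
  | cons x xs ih =>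
    intro ys t h1 h2 h3; cases ys with
    | nil => rw [lcpN_nil_right]; simpa using h2
    | cons y ys =>
      cases t with
      | zero => omega
      | succ t =>
        have hx : x = y := by simpa using h3 0 (by omega)
        have ht : t ≤ lcpN xs ys := ih ys t (by simpa using h1) (by simpa using h2)
          (fun p hp => by simpa using h3 (p+1) (by omega))
        simp only [lcpN, hx, if_true]
        omega

-- cap: matching against needle ++ tail then capping at needle's length = matching against needle
theorem min_lcpN_append : ∀ (A N X : List Int), min (lcpN A (N ++ X)) N.length = lcpN A N := by
  intro A; induction A with
  | nil => intro N X; simp [lcpN_nil_left]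
  | cons a A ih =>
    intro N X; cases N with
    | nil => simp [lcpN_nil_right]
    | cons n N =>
      simp only [List.cons_append, lcpN]
      split_ifs with h
      · simp only [List.length_cons, ← ih N X]; omega
      · simp

theorem getD_drop (l : List Int) (a p : Nat) : (l.drop a).getD p 0 = l.getD (a + p) 0 := by
  simp [List.getD, List.getElem?_drop]

theorem getD_nat_append_lt (z : List Nat) (w : List Nat) (j : Nat) (h : j < z.length) :
    (z ++ w).getD j 0 = z.getD j 0 := by
  simp [List.getD, List.getElem?_append_left h]

theorem getD_nat_append_len (z : List Nat) (a : Nat) :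
    (z ++ [a]).getD z.length 0 = a := by
  simp [List.getD]

-- ----- Z-algorithm correctness -----

theorem pvZExtend_spec (s : List Int) (k : Nat) (hk : 1 ≤ k) :
    ∀ (fuel zk : Nat), zk ≤ lcpN (s.drop k) s → lcpN (s.drop k) s ≤ zk + fuel →
    pvZExtend s k fuel zk = lcpN (s.drop k) s := by
  intro fuel
  induction fuel with
  | zero => intro zk h1 h2; simp only [pvZExtend]; omega
  | succ fuel ih =>
    intro zk h1 h2
    have hLd : lcpN (s.drop k) s ≤ s.length - k := by
      have := lcpN_le_left (s.drop k) s; simpa using this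
    rcases Nat.lt_or_ge zk (lcpN (s.drop k) s) with hlt | hge
    · have hklen : k ≤ s.length := by
        by_contra hcon
        have hnil : s.drop k = [] := List.drop_eq_nil_of_le (by omega)
        rw [hnil, lcpN_nil_left] at hlt; omega
      have hbound : k + zk < s.length := by omega
      have heq : s.getD zk 0 = s.getD (k + zk) 0 := by
        have hg := getD_eq_of_lt_lcpN (s.drop k) s zk hlt
        rw [getD_drop] at hg
        exact hg.symm
      rw [pvZExtend, if_pos ⟨hbound, heq⟩]
      exact ih (zk+1) (by omega) (by omega)
    · have hzk : zk = lcpN (s.drop k) s := by omega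
      rw [pvZExtend, if_neg]
      · exact hzk
      · rintro ⟨hb, he⟩
        have hklen : k ≤ s.length := by omega
        have h1' : lcpN (s.drop k) s < (s.drop k).length := by
          simp only [List.length_drop]; omega
        have h2' : lcpN (s.drop k) s < s.length := by omega
        have hne := ne_getD_lcpN (s.drop k) s h1' h2'
        rw [getD_drop] at hne
        rw [hzk] at he
        exact hne he.symm

def ZInv (s : List Int) (z : List Nat) (l r : Nat) : Prop :=
  1 ≤ z.length ∧ z.length ≤ s.length ∧
  (∀ j, 1 ≤ j → j < z.length → z.getD j 0 = lcpN (s.drop j) s) ∧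
  l < z.length ∧ r ≤ s.length ∧
  ((l = 0 ∧ r = 0) ∨ (1 ≤ l ∧ r = l + lcpN (s.drop l) s))

theorem pvZLoop_spec (s : List Int) :
    ∀ (fuel : Nat) (z : List Nat) (l r : Nat), ZInv s z l r → z.length + fuel = s.length →
    ∀ j, 1 ≤ j → j < s.length → (pvZLoop s fuel z l r).getD j 0 = lcpN (s.drop j) s := by
  intro fuel
  induction fuel with
  | zero =>
    intro z l r hinv hlen j hj1 hj2
    obtain ⟨_, _, hvals, _⟩ := hinv
    simpa [pvZLoop] using hvals j hj1 (by omega)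
  | succ fuel ih =>
    intro z l r hinv hlen
    obtain ⟨hz1, hzlen, hvals, hlz, hrs, hlr⟩ := hinv
    set k := z.length with hkdef
    have hk1 : 1 ≤ k := hz1
    have hks : k < s.length := by omega
    -- the start value is a valid lower bound for the Z value at k
    have hzk0 : (if k < r then min (r - k) (z.getD (k - l) 0) else 0) ≤ lcpN (s.drop k) s := by
      split_ifs with hkr
      · rcases hlr with ⟨hl0, hr0⟩ | ⟨hl1, hr⟩
        · omega
        · have hlk : l < k := hlz
          have hkl1 : 1 ≤ k - l := by omega
          have hklk : k - l < k := by omega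
          have hv : z.getD (k - l) 0 = lcpN (s.drop (k - l)) s := hvals (k - l) hkl1 hklk
          rw [hv]
          apply le_lcpN_of
          · simp only [List.length_drop]; omega
          · omega
          · intro p hp
            rw [getD_drop]
            have hp1 : p < r - k := by omega
            have hp2 : p < lcpN (s.drop (k - l)) s := by omega
            have e1 : (s.drop l).getD ((k - l) + p) 0 = s.getD ((k - l) + p) 0 :=
              getD_eq_of_lt_lcpN _ _ _ (by omega)
            rw [getD_drop] at e1
            have e2 : (s.drop (k - l)).getD p 0 = s.getD p 0 :=
              getD_eq_of_lt_lcpN _ _ _ hp2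
            rw [getD_drop] at e2
            have : l + (k - l + p) = k + p := by omega
            rw [this] at e1
            rw [e1, e2]
      · omega
    have hLle : lcpN (s.drop k) s ≤ s.length := by
      have := lcpN_le_left (s.drop k) s; simp only [List.length_drop] at this; omega
    have hzk : pvZExtend s k s.length (if k < r then min (r - k) (z.getD (k - l) 0) else 0)
        = lcpN (s.drop k) s := pvZExtend_spec s k hk1 s.length _ hzk0 (by omega)
    rw [pvZLoop]
    simp only [← hkdef, hzk]
    apply ih
    · constructor
      · simp only [List.length_append, List.length_singleton]; omega
      · constructor
        · simp only [List.length_append, List.length_singleton]; omega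
        constructor
        · intro j hj1 hj2
          simp only [List.length_append, List.length_singleton] at hj2
          rcases Nat.lt_or_ge j k with hjk | hjk
          · rw [getD_nat_append_lt z _ j hjk]; exact hvals j hj1 hjk
          · have : j = k := by omega
            subst this
            exact getD_nat_append_len z _
        constructor
        · simp only [List.length_append, List.length_singleton]
          split_ifs <;> omega
        constructor
        · split_ifs with h
          · have := lcpN_le_left (s.drop k) s
            simp only [List.length_drop] at this; omega
          · omega
        · split_ifs with h
          · right; exact ⟨hk1, rfl⟩
          · exact hlr
    · simp only [List.length_append, List.length_singleton]; omega

theorem pvZArray_spec (s : List Int) (j : Nat) (hj1 : 1 ≤ j) (hj2 : j < s.length) :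
    (pvZArray s).getD j 0 = lcpN (s.drop j) s := by
  rw [pvZArray, if_neg (by omega)]
  apply pvZLoop_spec s (s.length - 1) [0] 0 0
  · refine ⟨by simp, by simp; omega, ?_, by simp, by omega, Or.inl ⟨rfl, rfl⟩⟩
    intro j h1 h2; simp at h2; omega
  · simp; omega
  · exact hj1
  · exact hj2

-- ----- A's inner loop computes the lcp -----

theorem pvInnerA_spec (h nd : List Int) (i0 : Nat) :
    ∀ (fuel j : Nat) (ml : Int), j + fuel = min nd.length (h.length - i0) →
    j ≤ lcpN (h.drop i0) nd →
    pvInnerA h nd (i0 : Int) fuel j ml = ml + ((lcpN (h.drop i0) nd - j : Nat) : Int) := by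
  have hL1 : lcpN (h.drop i0) nd ≤ h.length - i0 := by
    have := lcpN_le_left (h.drop i0) nd; simpa using this
  have hL2 : lcpN (h.drop i0) nd ≤ nd.length := lcpN_le_right _ _
  intro fuel
  induction fuel with
  | zero => intro j ml hb hj; rw [pvInnerA]; have : j = lcpN (h.drop i0) nd := by omega
            rw [this]; simp
  | succ fuel ih =>
    intro j ml hb hj
    have hjb : j < min nd.length (h.length - i0) := by omega
    rw [pvInnerA]
    have hcast : (i0 : Int) + (j : Int) = ((i0 + j : Nat) : Int) := by push_cast; ring
    rw [hcast, PySem.List.pyGetD_natCast, PySem.List.pyGetD_natCast]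
    rcases Nat.lt_or_ge j (lcpN (h.drop i0) nd) with hlt | hge
    · have heq : h.getD (i0 + j) 0 = nd.getD j 0 := by
        have := getD_eq_of_lt_lcpN (h.drop i0) nd j hlt
        rwa [getD_drop] at this
      rw [if_pos heq]
      rw [ih (j+1) (ml+1) (by omega) (by omega)]
      push_cast [Nat.sub_add_eq]
      omega
    · have hjeq : j = lcpN (h.drop i0) nd := by omega
      rw [if_neg]
      · rw [hjeq]; simp
      · intro heq
        have h1' : lcpN (h.drop i0) nd < (h.drop i0).length := by
          simp only [List.length_drop]; omega
        have h2' : lcpN (h.drop i0) nd < nd.length := by omega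
        have := ne_getD_lcpN (h.drop i0) nd h1' h2'
        rw [getD_drop] at this
        rw [hjeq] at heq
        exact this heq

-- per-position value of A's scan, for any i from the outer range
theorem matchLenA_eq (h nd : List Int) (i : Int) (hi : 0 ≤ i) :
    pvInnerA h nd i (min (nd.length : Int) ((h.length : Int) - i)).toNat 0 0
      = ((lcpN (h.drop i.toNat) nd : Nat) : Int) := by
  obtain ⟨i0, rfl⟩ : ∃ i0 : Nat, i = (i0 : Int) := ⟨i.toNat, (Int.toNat_of_nonneg hi).symm⟩
  simp only [Int.toNat_natCast]
  by_cases hle : (i0 : Int) ≤ (h.length : Int)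
  · have hb : (min (nd.length : Int) ((h.length : Int) - (i0 : Int))).toNat
        = min nd.length (h.length - i0) := by omega
    rw [hb]
    rw [pvInnerA_spec h nd i0 _ 0 0 (by omega) (by omega)]
    simp
  · have hb : (min (nd.length : Int) ((h.length : Int) - (i0 : Int))).toNat = 0 := by omega
    have hdrop : h.drop i0 = [] := List.drop_eq_nil_of_le (by omega)
    rw [hb, hdrop, lcpN_nil_left, pvInnerA]
    simp

-- per-position value of B's capped Z lookup, for real offsets
theorem zValB_eq (h nd : List Int) (i : Int) (hi : 0 ≤ i) (hih : i < (h.length : Int)) :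
    min (((pvZArray (nd ++ h)).getD ((nd.length : Int) + i).toNat 0 : Nat) : Int) (nd.length : Int)
      = ((lcpN (h.drop i.toNat) nd : Nat) : Int) := by
  have hk : ((nd.length : Int) + i).toNat = nd.length + i.toNat := by omega
  rw [hk]
  have hdrop : (nd ++ h).drop (nd.length + i.toNat) = h.drop i.toNat := by
    rw [List.drop_append]
    simp [List.drop_eq_nil_of_le (Nat.le_add_right nd.length i.toNat)]
  rcases Nat.eq_zero_or_pos (nd.length + i.toNat) with hz | hpos
  · have hnd : nd = [] := List.eq_nil_of_length_eq_zero (by omega)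
    subst hnd
    simp [lcpN_nil_right]
  · rw [pvZArray_spec (nd ++ h) _ (by omega) (by simp; omega)]
    rw [hdrop]
    rw [← Nat.cast_min, min_lcpN_append]

-- ===== VERDICT (by name: the statement is the Claim_ definition above) =====
theorem find_byte_pattern_spec : Claim_unchanged_find_byte_pattern := by
  intro h nd m _
  unfold Spec_find_byte_pattern
  intro hD
  have hm0 : 0 ≤ m := by
    unfold D_find_byte_pattern at hD; omega
  simp only [find_byte_pattern, find_byte_pattern_alt]
  rw [PySem.List.foldl_append_ite
    (p := fun i => m ≤ pvInnerA h nd i (min (nd.length : Int) ((h.length : Int) - i)).toNat 0 0)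
    (f := fun i => [("haystack_offset", i), ("needle_offset", (0 : Int)),
      ("length", pvInnerA h nd i (min (nd.length : Int) ((h.length : Int) - i)).toNat 0 0)])]
  rw [PySem.List.foldl_append_ite
    (p := fun i => m ≤ min (((pvZArray (nd ++ h)).getD ((nd.length : Int) + i).toNat 0 : Nat) : Int) (nd.length : Int))
    (f := fun i => [("haystack_offset", i), ("needle_offset", (0 : Int)),
      ("length", min (((pvZArray (nd ++ h)).getD ((nd.length : Int) + i).toNat 0 : Nat) : Int) (nd.length : Int))])]
  simp only [List.nil_append]
  have hbnd : (h.length : Int) - max m 0 = (h.length : Int) - m := by omega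
  rw [hbnd]
  by_cases hmL : m ≤ (h.length : Int)
  · have hval : ∀ i ∈ PySem.List.pyRange 0 ((h.length : Int) - m) 1,
        pvInnerA h nd i (min (nd.length : Int) ((h.length : Int) - i)).toNat 0 0
          = min (((pvZArray (nd ++ h)).getD ((nd.length : Int) + i).toNat 0 : Nat) : Int) (nd.length : Int) := by
      intro i hir
      obtain ⟨hi1, hi2⟩ := PySem.List.mem_pyRange_one.mp hir
      rw [matchLenA_eq h nd i hi1, zValB_eq h nd i hi1 (by omega)]
    rw [List.filter_congr (fun i hir => by rw [hval i hir])]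
    exact List.map_congr_left (fun i hifil => by rw [hval i ((List.mem_filter.mp hifil).1)])
  · -- m > len(haystack): both ranges are empty
    rw [PySem.List.pyRange_one_eq_nil (a := (0 : Int)) (by omega)]
    simp

theorem find_byte_pattern_changed : Claim_changed_find_byte_pattern := by
  unfold Claim_changed_find_byte_pattern; decide

theorem find_byte_pattern_tight : Claim_exact_find_byte_pattern := by
  intro h nd m _ hD heq
  unfold D_find_byte_pattern at hD
  simp only [find_byte_pattern, find_byte_pattern_alt] at heq
  rw [PySem.List.foldl_append_ite
    (p := fun i => m ≤ pvInnerA h nd i (min (nd.length : Int) ((h.length : Int) - i)).toNat 0 0)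
    (f := fun i => [("haystack_offset", i), ("needle_offset", (0 : Int)),
      ("length", pvInnerA h nd i (min (nd.length : Int) ((h.length : Int) - i)).toNat 0 0)])] at heq
  rw [PySem.List.foldl_append_ite
    (p := fun i => m ≤ min (((pvZArray (nd ++ h)).getD ((nd.length : Int) + i).toNat 0 : Nat) : Int) (nd.length : Int))
    (f := fun i => [("haystack_offset", i), ("needle_offset", (0 : Int)),
      ("length", min (((pvZArray (nd ++ h)).getD ((nd.length : Int) + i).toNat 0 : Nat) : Int) (nd.length : Int))])] at heq
  simp only [List.nil_append] at heq
  -- min_length < 0: A keeps every offset of its longer range, so A's list is strictly longer than B's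
  have hfa : (PySem.List.pyRange 0 ((h.length : Int) - m) 1).filter
      (fun i => decide (m ≤ pvInnerA h nd i (min (nd.length : Int) ((h.length : Int) - i)).toNat 0 0))
      = PySem.List.pyRange 0 ((h.length : Int) - m) 1 := by
    rw [List.filter_eq_self]
    intro i hir
    have hi : 0 ≤ i := (PySem.List.mem_pyRange_one.mp hir).1
    simp only [decide_eq_true_eq]
    rw [matchLenA_eq h nd i hi]
    have : (0 : Int) ≤ ((lcpN (h.drop i.toNat) nd : Nat) : Int) := by positivity
    omega
  have hlen := congrArg List.length heq
  rw [List.length_map, List.length_map, hfa, PySem.List.length_pyRange_one] at hlen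
  have hub := List.length_filter_le
    (fun i => decide (m ≤ min (((pvZArray (nd ++ h)).getD ((nd.length : Int) + i).toNat 0 : Nat) : Int) (nd.length : Int)))
    (PySem.List.pyRange 0 ((h.length : Int) - max m 0) 1)
  rw [PySem.List.length_pyRange_one] at hub
  omega
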